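-- pv_equiv track=rewrite | github.com/stans184/algo_prac | PYTHON_ALGO/sanggil_book/7_array/4_array_partition.py | sol1
-- ===== SOURCE A (Python) =====
-- def sol1(nums):
--     sum = 0
--     pair = []
--     nums.sort()
--
--     for n in nums:
--         # 앞에서부터 오름차순으로 페어를 만들면서 합 계산
--         pair.append(n)
--         if len(pair) == 2:
--             sum += min(pair)
--             pair = []
--
--     return sum
-- ===== SOURCE B (Python) =====
-- def sol1(nums):
--     nums.sort()
--     # After sorting, the minimum of each adjacent pair is its first (even-index)
--     # element, so no pairing or min() is needed: sum the even-index elements,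
--     # truncating to even length so an unpaired trailing element is dropped.
--     return sum(nums[: 2 * (len(nums) // 2) : 2])
-- ===== Notes on version B (the rewrite author's own statement) =====
-- stated objective: alternative
-- what changed: Drops the pair buffer and min() entirely: uses the sortedness invariant that the minimum of each adjacent pair is its even-index element, and sums the even-index slice truncated to even length.
import Mathlib
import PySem

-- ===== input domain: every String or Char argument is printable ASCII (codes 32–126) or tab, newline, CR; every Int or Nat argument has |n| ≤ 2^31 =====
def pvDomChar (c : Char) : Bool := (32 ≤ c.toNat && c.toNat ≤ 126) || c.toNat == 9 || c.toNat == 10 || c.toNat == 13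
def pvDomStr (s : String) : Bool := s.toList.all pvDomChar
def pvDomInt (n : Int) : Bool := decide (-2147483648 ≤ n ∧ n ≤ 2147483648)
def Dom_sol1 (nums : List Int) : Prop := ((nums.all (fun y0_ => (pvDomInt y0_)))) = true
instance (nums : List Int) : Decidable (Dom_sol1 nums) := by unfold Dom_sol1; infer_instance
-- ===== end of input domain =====

-- B drops A's pair buffer and min(): after sorting, the minimum of each adjacent pair is its
-- even-index element, so B sums the even-index slice truncated to even length (alternative, same cost).
-- Both A and B sort nums in place; the equivalence proved here is about the return value.

-- ===== PORT A =====
def sol1 (nums : List Int) : Int :=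
  let sortedNums := PySem.List.sorted nums (fun v => v) false
  let st := sortedNums.foldl (fun (acc : Int × List Int) n =>
      let pair := acc.2 ++ [n]
      if pair.length == 2 then
        -- min(pair): pair is nonempty here, so min? is always `some`
        (acc.1 + (PySem.List.min? pair (fun v => v)).getD 0, ([] : List Int))
      else
        (acc.1, pair)) (0, [])
  st.1

-- ===== PORT B =====
def sol1_alt (nums : List Int) : Int :=
  let s := PySem.List.sorted nums (fun v => v) false
  -- nums[: 2 * (len(nums) // 2) : 2]; step 2 ≠ 0, so slice? is always `some`
  ((PySem.List.slice? s (some 0) (some (2 * ((s.length : Int) / 2))) 2).getD []).sum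

-- ===== PRECONDITION & SPEC =====
def Spec_sol1 (nums : List Int) (out : Int) : Prop := out = sol1_alt nums
instance (nums : List Int) (out : Int) : Decidable (Spec_sol1 nums out) := by unfold Spec_sol1; infer_instance

-- ===== CLAIM (what is proved, stated in full; the proofs are below) =====
def Claim_equal_sol1 : Prop := ∀ (nums : List Int), Dom_sol1 nums → Spec_sol1 nums (sol1 nums)

-- ===== LEMMAS AND PROOFS =====

-- the even-index elements of the first 2*(len/2) positions (proof-side view of B's slice)
def evenIdx (xs : List Int) : List Int :=
  List.filterMap (fun k => xs[2*k]?) (List.range (xs.length/2))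

lemma evenIdx_nil : evenIdx [] = [] := by simp [evenIdx]

lemma evenIdx_one (x : Int) : evenIdx [x] = [] := by simp [evenIdx]

lemma evenIdx_cons2 (x y : Int) (u : List Int) :
    evenIdx (x :: y :: u) = x :: evenIdx u := by
  unfold evenIdx
  have hl : (x :: y :: u).length / 2 = u.length / 2 + 1 := by simp; omega
  rw [hl, List.range_succ_eq_map, List.filterMap_cons, List.filterMap_map]
  have he : ((fun k => (x :: y :: u)[2*k]?) ∘ (fun k => k+1)) = (fun k => u[2*k]?) := by
    funext k
    have h2 : 2*(k+1) = (2*k+1) + 1 := by omega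
    simp only [Function.comp_def, h2, List.getElem?_cons_succ]
  rw [he]
  simp

-- B's slice is exactly evenIdx
lemma sliceB (xs : List Int) :
    PySem.List.slice? xs (some 0) (some (2 * ((xs.length : Int) / 2))) 2 = some (evenIdx xs) := by
  simp only [PySem.List.slice?, PySem.List.sliceIndices]
  norm_num
  have hstop : (if 2 * ((xs.length : Int) / 2) < 0 then max (2 * ((xs.length : Int) / 2) + xs.length) 0
      else min (2 * ((xs.length : Int) / 2)) xs.length) = 2 * ((xs.length : Int) / 2) := by
    have h1 : (0:Int) ≤ 2 * ((xs.length : Int) / 2) := by positivity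
    have h2 : 2 * ((xs.length : Int) / 2) ≤ xs.length := by omega
    simp [not_lt.mpr h1]
    omega
  rw [hstop]
  have hcount : (if 0 < 2 * ((xs.length : Int) / 2) then ((2 * ((xs.length : Int) / 2) + 2 - 1) / 2).toNat else 0)
      = xs.length / 2 := by
    split_ifs with h
    · omega
    · omega
  rw [hcount]
  have hidx : (fun (k:Nat) => xs[(2 * (k:Int)).toNat]?) = (fun k => xs[2*k]?) := by
    funext k
    have h : (2 * (k:Int)).toNat = 2*k := by omega
    rw [h]
  rw [hidx]
  rfl

-- sum of pairwise minima of consecutive pairs (proof-side view of A's loop result)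
def zipMinSum : List Int → Int
  | x :: y :: u => min x y + zipMinSum u
  | _ => 0

-- A's loop body
def stepA (acc : Int × List Int) (n : Int) : Int × List Int :=
  let pair := acc.2 ++ [n]
  if pair.length == 2 then
    (acc.1 + (PySem.List.min? pair (fun v => v)).getD 0, ([] : List Int))
  else
    (acc.1, pair)

lemma foldA_eq (l : List Int) :
    (∀ s : Int, (List.foldl stepA (s, ([] : List Int)) l).1 = s + zipMinSum l) ∧
    (∀ (s x : Int), (List.foldl stepA (s, [x]) l).1 = s +
      (match l with | [] => 0 | y :: u => min x y + zipMinSum u)) := by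
  induction l with
  | nil => simp [zipMinSum]
  | cons a t ih =>
    refine ⟨?_, ?_⟩
    · intro s
      have h1 : stepA (s, []) a = (s, [a]) := by simp [stepA]
      rw [List.foldl_cons, h1, ih.2 s a]
      cases t <;> simp [zipMinSum]
    · intro s x
      have h2 : stepA (s, [x]) a = (s + min x a, []) := by
        simp [stepA, PySem.List.min?_id_cons]
      rw [List.foldl_cons, h2, ih.1 (s + min x a)]
      ring

-- on a weakly increasing list the pairwise minima are exactly the even-index elements
lemma zms_eq_evenIdx (n : Nat) : ∀ l : List Int, l.length ≤ n → l.Pairwise (· ≤ ·) →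
    zipMinSum l = (evenIdx l).sum := by
  induction n with
  | zero =>
    intro l hl _
    have : l = [] := by cases l <;> simp_all
    subst this; simp [zipMinSum, evenIdx_nil]
  | succ m ih =>
    intro l hl hp
    match l with
    | [] => simp [zipMinSum, evenIdx_nil]
    | [x] => simp [zipMinSum, evenIdx_one]
    | x :: y :: u =>
      have hxy : x ≤ y := (List.pairwise_cons.mp hp).1 y (by simp)
      have hpu : u.Pairwise (· ≤ ·) :=
        (List.pairwise_cons.mp (List.pairwise_cons.mp hp).2).2
      have hlu : u.length ≤ m := by simp at hl; omega
      simp [zipMinSum, evenIdx_cons2, min_eq_left hxy, ih u hlu hpu]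

-- ===== VERDICT (by name: the statement is the Claim_ definition above) =====
theorem sol1_spec : Claim_equal_sol1 := by
  intro nums _
  unfold Spec_sol1 sol1 sol1_alt
  dsimp only
  rw [sliceB]
  simp only [Option.getD_some]
  have hA := (foldA_eq (PySem.List.sorted nums (fun v => v) false)).1 0
  simp only [zero_add] at hA
  exact hA.trans (zms_eq_evenIdx (PySem.List.sorted nums (fun v => v) false).length _ le_rfl
    (PySem.List.sorted_pairwise nums (fun v => v)))
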